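-- pv_equiv track=rewrite | github.com/DimonAgon/math-one | funcs.py | makeFormatedSet
-- ===== SOURCE A (Python) =====
-- def makeFormatedSet(A):
--     i = 1
--     frmtd_set = ''
--     for el in A:
--         if i < 20:
--             frmtd_set += str(el)+", "
--         else:
--             i = 0
--             frmtd_set += str(el) + ",\n"
--         i += 1
--     return frmtd_set[:-2]
-- ===== SOURCE B (Python) =====
-- def makeFormatedSet(A):
--     items = [str(el) for el in A]
--     chunks = []
--     i = 0
--     while i < len(items):
--         chunks.append(", ".join(items[i:i+20]))
--         i += 20
--     return ",\n".join(chunks)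
-- ===== Notes on version B (the rewrite author's own statement) =====
-- stated objective: idiomatic
-- what changed: Replaces the single-pass counter-and-reset string accumulation with the trailing-separator strip by building the 20-element chunks first and joining twice (', '.join inside each chunk, ',\n'.join across chunks), so no counter and no [:-2] strip are needed.
import Mathlib
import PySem

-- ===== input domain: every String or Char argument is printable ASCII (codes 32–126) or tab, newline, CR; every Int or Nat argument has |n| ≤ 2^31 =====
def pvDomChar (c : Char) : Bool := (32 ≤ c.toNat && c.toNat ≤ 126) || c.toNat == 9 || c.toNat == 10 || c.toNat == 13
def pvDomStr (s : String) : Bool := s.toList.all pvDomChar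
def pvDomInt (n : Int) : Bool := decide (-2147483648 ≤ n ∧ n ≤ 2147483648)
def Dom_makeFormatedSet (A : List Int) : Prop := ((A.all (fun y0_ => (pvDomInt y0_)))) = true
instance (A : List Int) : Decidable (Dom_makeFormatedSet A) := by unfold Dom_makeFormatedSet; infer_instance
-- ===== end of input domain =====

-- B replaces A's counter-and-reset single pass (with the final [:-2] strip) by chunking into
-- groups of 20 and joining twice; same return value, no speed claim (objective: idiomatic).

-- ===== PORT A =====
-- A: counter i starting at 1, accumulate "el, " (or "el,\n" and reset on the 20th), strip [:-2].
def makeFormatedSet (A : List Int) : String :=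
  String.ofList (PySem.List.slice
    (A.foldl (fun (st : Int × List Char) el =>
      if st.1 < 20 then (st.1 + 1, st.2 ++ PySem.Int.toChars el ++ [',', ' '])
      else (0 + 1, st.2 ++ PySem.Int.toChars el ++ [',', '\n'])) (1, [])).2
    none (some (-2)))

-- ===== PORT B =====
-- B: i = 0; while i < len(items): emit ", ".join(items[i:i+20]); i += 20; then ",\n".join(chunks).
def pvChunksB (items : List (List Char)) (i : Int) : List (List Char) :=
  if h : i < (items.length : Int) then
    PySem.Chars.join [',', ' '] (PySem.List.slice items (some i) (some (i + 20))) ::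
      pvChunksB items (i + 20)
  else []
termination_by (items.length - i).toNat
decreasing_by omega

def makeFormatedSet_alt (A : List Int) : String :=
  String.ofList (PySem.Chars.join [',', '\n'] (pvChunksB (A.map PySem.Int.toChars) 0))

-- ===== PRECONDITION & SPEC =====
def Spec_makeFormatedSet (A : List Int) (out : String) : Prop := out = makeFormatedSet_alt A
instance (A : List Int) (out : String) : Decidable (Spec_makeFormatedSet A out) := by unfold Spec_makeFormatedSet; infer_instance

-- ===== CLAIM (what is proved, stated in full; the proofs are below) =====
def Claim_equal_makeFormatedSet : Prop := ∀ (A : List Int), Dom_makeFormatedSet A → Spec_makeFormatedSet A (makeFormatedSet A)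

-- ===== LEMMAS AND PROOFS =====

-- A's accumulated string WITH the trailing separator, parametrised by the number k of
-- remaining slots in the current 20-chunk (k = 21 - i).
def pvSeg : List Int → Nat → List Char
  | [], _ => []
  | x :: xs, k =>
      PySem.Int.toChars x ++ (if 2 ≤ k then [',', ' '] else [',', '\n']) ++
        pvSeg xs (if 2 ≤ k then k - 1 else 20)

-- the same string WITHOUT the trailing separator
def pvOut : List Int → Nat → List Char
  | [], _ => []
  | [x], _ => PySem.Int.toChars x
  | x :: y :: xs, k =>
      PySem.Int.toChars x ++ (if 2 ≤ k then [',', ' '] else [',', '\n']) ++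
        pvOut (y :: xs) (if 2 ≤ k then k - 1 else 20)

theorem pvSeg_loopA (l : List Int) : ∀ (i : Int) (s : List Char), 1 ≤ i → i ≤ 20 →
    (l.foldl (fun (st : Int × List Char) el =>
      if st.1 < 20 then (st.1 + 1, st.2 ++ PySem.Int.toChars el ++ [',', ' '])
      else (0 + 1, st.2 ++ PySem.Int.toChars el ++ [',', '\n'])) (i, s)).2
    = s ++ pvSeg l (21 - i).toNat := by
  induction l with
  | nil => intro i s h1 h2; simp [pvSeg]
  | cons x xs ih =>
    intro i s h1 h2
    by_cases hlt : i < 20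
    · simp only [List.foldl_cons, if_pos hlt]
      rw [ih (i + 1) _ (by omega) (by omega)]
      have hk : 2 ≤ (21 - i).toNat := by omega
      have hk' : (21 - i).toNat - 1 = (21 - (i + 1)).toNat := by omega
      simp only [pvSeg, if_pos hk, hk', List.append_assoc]
    · have hi : i = 20 := by omega
      subst hi
      simp only [List.foldl_cons, if_neg hlt]
      rw [ih (0 + 1) _ (by omega) (by omega)]
      have hk : ¬ 2 ≤ ((21:Int) - 20).toNat := by decide
      simp only [pvSeg, if_neg hk]
      norm_num
      rfl

theorem pvSeg_len_ge (x : Int) (xs : List Int) (k : Nat) : 2 ≤ (pvSeg (x :: xs) k).length := by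
  simp only [pvSeg]
  by_cases h : 2 ≤ k <;> simp [h] <;> omega

-- one-step unfolding equations (controlled, to avoid simp unfolding recursively)
theorem pvSeg_cons (x : Int) (xs : List Int) (k : Nat) :
    pvSeg (x :: xs) k = PySem.Int.toChars x ++ ((if 2 ≤ k then [',', ' '] else [',', '\n']) ++
      pvSeg xs (if 2 ≤ k then k - 1 else 20)) := by
  simp [pvSeg]

theorem pvOut_cc (x y : Int) (ys : List Int) (k : Nat) :
    pvOut (x :: y :: ys) k = PySem.Int.toChars x ++ ((if 2 ≤ k then [',', ' '] else [',', '\n']) ++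
      pvOut (y :: ys) (if 2 ≤ k then k - 1 else 20)) := by
  simp [pvOut]

theorem pvTakeA (a sep : List Char) (hsep : sep.length = 2) :
    (a ++ sep).take ((a ++ sep).length - 2) = a := by
  rw [List.length_append, hsep, Nat.add_sub_cancel, List.take_left]

theorem pvTakeB (a sep s : List Char) (hsep : sep.length = 2) (hs : 2 ≤ s.length) :
    (a ++ (sep ++ s)).take ((a ++ (sep ++ s)).length - 2)
      = a ++ (sep ++ s.take (s.length - 2)) := by
  have h1 : (a ++ (sep ++ s)).length - 2 = a.length + (sep.length + (s.length - 2)) := by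
    simp [hsep]; omega
  have ha : a.length ≤ a.length + (sep.length + (s.length - 2)) := by omega
  have hb : sep.length ≤ sep.length + (s.length - 2) := by omega
  rw [h1, List.take_append, List.take_append, Nat.add_sub_cancel_left,
      Nat.add_sub_cancel_left, List.take_of_length_le ha, List.take_of_length_le hb]

-- stripping the trailing two characters of pvSeg gives pvOut
theorem pvTake_seg (l : List Int) : ∀ k, (pvSeg l k).take ((pvSeg l k).length - 2) = pvOut l k := by
  induction l with
  | nil => intro k; simp [pvSeg, pvOut]
  | cons x xs ih =>
    intro k
    have hsep : ((if 2 ≤ k then [',', ' '] else [',', '\n']) : List Char).length = 2 := by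
      by_cases h : 2 ≤ k <;> simp [h]
    cases xs with
    | nil =>
      rw [pvSeg_cons]
      simp only [pvSeg, List.append_nil]
      rw [pvTakeA _ _ hsep]
      rfl
    | cons y ys =>
      rw [pvSeg_cons, pvTakeB _ _ _ hsep (pvSeg_len_ge y ys _), ih, pvOut_cc]

-- within one chunk (length l ≤ k) pvOut is the plain ", "-join
theorem pvOut_small (l : List Int) : ∀ k, l ≠ [] → l.length ≤ k →
    pvOut l k = PySem.Chars.join [',', ' '] (l.map PySem.Int.toChars) := by
  induction l with
  | nil => intro k h; exact absurd rfl h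
  | cons x xs ih =>
    intro k _ hlen
    cases xs with
    | nil => simp [pvOut, PySem.Chars.join_singleton]
    | cons y ys =>
      have hk : 2 ≤ k := by simp at hlen; omega
      simp only [pvOut, if_pos hk, List.map_cons, PySem.Chars.join_cons_cons]
      rw [ih (k - 1) (by simp) (by simp at hlen ⊢; omega)]
      simp

-- chunk split: with k < length l, pvOut splits at position k into a ", "-joined chunk,
-- the ",\n" separator, and pvOut of the rest restarted at 20
theorem pvOut_split (l : List Int) : ∀ k, 1 ≤ k → k < l.length →
    pvOut l k = PySem.Chars.join [',', ' '] ((l.take k).map PySem.Int.toChars) ++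
      [',', '\n'] ++ pvOut (l.drop k) 20 := by
  induction l with
  | nil => intro k h1 h2; simp at h2
  | cons x xs ih =>
    intro k h1 h2
    rcases Nat.lt_or_ge k 2 with hk | hk
    · have : k = 1 := by omega
      subst this
      obtain ⟨y, ys, rfl⟩ : ∃ y ys, xs = y :: ys := by
        cases xs with
        | nil => simp at h2
        | cons y ys => exact ⟨y, ys, rfl⟩
      simp [pvOut, PySem.Chars.join_singleton]
    · obtain ⟨y, ys, rfl⟩ : ∃ y ys, xs = y :: ys := by
        cases xs with
        | nil => simp at h2; omega
        | cons y ys => exact ⟨y, ys, rfl⟩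
      simp only [pvOut, if_pos hk]
      rw [ih (k - 1) (by omega) (by simp at h2 ⊢; omega)]
      obtain ⟨m, rfl⟩ : ∃ m, k = m + 1 := ⟨k - 1, by omega⟩
      have hm : 1 ≤ m := by omega
      obtain ⟨z, zs, hz⟩ : ∃ z zs, (y :: ys).take m = z :: zs := by
        cases m with
        | zero => omega
        | succ n => exact ⟨y, ys.take n, rfl⟩
      rw [List.take_succ_cons, List.drop_succ_cons, Nat.add_sub_cancel, hz,
          List.map_cons]
      simp [PySem.Chars.join_cons_cons, List.append_assoc]
-- proof-side restatement of B's loop: the chunks of the not-yet-processed suffix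
def pvRest (items : List (List Char)) : List (List Char) :=
  if items = [] then []
  else PySem.Chars.join [',', ' '] (items.take 20) :: pvRest (items.drop 20)
termination_by items.length
decreasing_by
  rename_i h
  have : items.length ≠ 0 := fun hl => h (List.eq_nil_of_length_eq_zero hl)
  simp
  omega

-- B's index loop at offset j computes pvRest of the suffix from j
theorem pvChunksB_shift (n : Nat) : ∀ (items : List (List Char)) (j : Nat),
    items.length - j ≤ n → pvChunksB items (j : Int) = pvRest (items.drop j) := by
  induction n with
  | zero =>
    intro items j hn
    have hj : items.length ≤ j := by omega
    rw [pvChunksB, dif_neg (by omega), List.drop_of_length_le hj, pvRest, if_pos rfl]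
  | succ n ih =>
    intro items j hn
    by_cases hj : j < items.length
    · rw [pvChunksB, dif_pos (by omega)]
      rw [show ((20:Int)) = (((20 : Nat)) : Int) from by norm_num,
          PySem.List.slice_natCast_add items j 20,
          show ((j : Int) + ((20 : Nat) : Int)) = (((j + 20 : Nat)) : Int) from by push_cast; ring,
          ih items (j + 20) (by omega)]
      have hdne : items.drop j ≠ [] := by
        intro h
        have hh := congrArg List.length h
        simp at hh
        omega
      conv_rhs => rw [pvRest]
      rw [if_neg hdne, List.drop_drop]
    · rw [pvChunksB, dif_neg (by omega),
          List.drop_of_length_le (by omega), pvRest, if_pos rfl]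

-- B's chunked double-join equals pvOut restarted at 20 (strong induction on the length)
theorem pvRest_join (n : Nat) : ∀ (l : List Int), l.length ≤ n → l ≠ [] →
    PySem.Chars.join [',', '\n'] (pvRest (l.map PySem.Int.toChars)) = pvOut l 20 := by
  induction n with
  | zero => intro l hl hne
            exact absurd (List.eq_nil_of_length_eq_zero (Nat.le_zero.mp hl)) hne
  | succ n ih =>
    intro l hl hne
    rw [pvRest, if_neg (by simpa using hne), ← List.map_take, ← List.map_drop]
    by_cases hlen : l.length ≤ 20
    · rw [List.drop_of_length_le hlen, List.take_of_length_le hlen]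
      simp only [List.map_nil]
      rw [pvRest, if_pos rfl, PySem.Chars.join_singleton]
      rw [pvOut_small l 20 hne hlen]
    · replace hlen : 20 < l.length := by omega
      have hdne : l.drop 20 ≠ [] := by
        intro h
        have hh := congrArg List.length h
        simp at hh
        omega
      have hrec := ih (l.drop 20) (by simp; omega) hdne
      obtain ⟨c, cs, hc⟩ : ∃ c cs, pvRest ((l.drop 20).map PySem.Int.toChars) = c :: cs := by
        rw [pvRest, if_neg (by simpa using hdne)]; exact ⟨_, _, rfl⟩
      rw [hc, PySem.Chars.join_cons_cons, ← hc, hrec]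
      rw [pvOut_split l 20 (by omega) hlen]

-- ===== VERDICT (by name: the statement is the Claim_ definition above) =====
theorem makeFormatedSet_spec : Claim_equal_makeFormatedSet := by
  intro A _
  unfold Spec_makeFormatedSet makeFormatedSet makeFormatedSet_alt
  have hshift := pvChunksB_shift (A.map PySem.Int.toChars).length (A.map PySem.Int.toChars) 0
    (by omega)
  rcases eq_or_ne A [] with rfl | hne
  · simp at hshift
    simp [hshift, pvRest, PySem.Chars.join_nil, PySem.List.slice]
  · rw [pvSeg_loopA A 1 [] (by omega) (by omega)]
    have h21 : ((21:Int) - 1).toNat = 20 := by decide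
    rw [h21, List.nil_append,
        PySem.List.slice_to_neg_ofNat _ 2 (by omega),
        pvTake_seg]
    push_cast [List.drop_zero] at hshift
    rw [hshift, pvRest_join A.length A (le_refl _) hne]
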